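-- pv_equiv track=rewrite | github.com/maximallia/CS512-Optimal-Timetable-with-Graph-Coloring | project_group_01_04 5_graph_coloring_greedy.py | first_available_color
-- ===== SOURCE A (Python) =====
-- def first_available_color(neighbor_color: list):
--     color_set = set(neighbor_color)
--     count = 0
--     while True:
--         if count in color_set:
--             count += 1
--         else:
--             return count
-- ===== SOURCE B (Python) =====
-- def first_available_color(neighbor_color: list):
--     candidate = 0
--     for v in sorted(neighbor_color):
--         if v < candidate:
--             continue
--         if v == candidate:
--             candidate += 1
--         else:
--             break
--     return candidate
-- ===== Notes on version B (the rewrite author's own statement) =====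
-- stated objective: alternative
-- what changed: Replaces the hash-set build plus a membership-probing while-loop with a single gap-scan over the sorted list that advances a candidate past equal values and stops at the first gap.
import Mathlib
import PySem

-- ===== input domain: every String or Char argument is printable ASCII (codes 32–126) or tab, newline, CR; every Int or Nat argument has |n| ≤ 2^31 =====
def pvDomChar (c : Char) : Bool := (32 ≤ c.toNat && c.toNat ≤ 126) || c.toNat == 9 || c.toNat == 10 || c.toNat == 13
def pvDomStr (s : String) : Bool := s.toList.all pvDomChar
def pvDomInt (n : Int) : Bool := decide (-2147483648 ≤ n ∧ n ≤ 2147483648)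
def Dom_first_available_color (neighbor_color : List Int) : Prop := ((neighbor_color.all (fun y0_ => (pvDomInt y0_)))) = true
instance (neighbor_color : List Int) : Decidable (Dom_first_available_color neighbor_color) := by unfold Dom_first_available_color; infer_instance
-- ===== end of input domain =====

-- B replaces A's hash-set membership loop by a single gap-scan over the sorted list (alternative decomposition, same result).

-- ===== PORT A =====
-- A's 'while True' increments count while it is in the set; it finds a free value within
-- length+1 steps (the set has at most `length` members), so the fuel below never runs out.
def faLoop (s : PySem.Set Int) (count : Int) : Nat → Int
  | 0 => count
  | n + 1 => if PySem.Set.contains s count then faLoop s (count + 1) n else count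

def first_available_color (neighbor_color : List Int) : Int :=
  faLoop (PySem.Set.ofList neighbor_color) 0 (neighbor_color.length + 1)

-- ===== PORT B =====
def faScan : List Int → Int → Int
  | [], c => c
  | v :: rest, c =>
    if v < c then faScan rest c
    else if v = c then faScan rest (c + 1)
    else c

def first_available_color_alt (neighbor_color : List Int) : Int :=
  faScan (PySem.List.sorted neighbor_color (fun x => x) false) 0

-- ===== PRECONDITION & SPEC =====
def Spec_first_available_color (neighbor_color : List Int) (out : Int) : Prop := out = first_available_color_alt neighbor_color
instance (neighbor_color : List Int) (out : Int) : Decidable (Spec_first_available_color neighbor_color out) := by unfold Spec_first_available_color; infer_instance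

-- ===== CLAIM (what is proved, stated in full; the proofs are below) =====
def Claim_equal_first_available_color : Prop := ∀ (neighbor_color : List Int), Dom_first_available_color neighbor_color → Spec_first_available_color neighbor_color (first_available_color neighbor_color)

-- ===== LEMMAS AND PROOFS =====

-- faScan, run on a sorted suffix xs of l with candidate c, returns the least r ≥ c not in l,
-- given the invariant: xs ⊆ l, every member of l that is ≥ c is in xs, everything in [0,c) is in l.
theorem faScan_spec (l : List Int) :
    ∀ (xs : List Int) (c : Int),
      xs.Pairwise (· ≤ ·) →
      (∀ y ∈ xs, y ∈ l) →
      (∀ y ∈ l, c ≤ y → y ∈ xs) →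
      (∀ k : Int, 0 ≤ k → k < c → k ∈ l) →
      c ≤ faScan xs c ∧ faScan xs c ∉ l ∧
        (∀ k : Int, 0 ≤ k → k < faScan xs c → k ∈ l) := by
  intro xs
  induction xs with
  | nil =>
    intro c _ _ hup hlow
    refine ⟨le_refl _, fun hc => ?_, by simpa [faScan] using hlow⟩
    simpa using hup c hc (le_refl c)
  | cons v rest ih =>
    intro c hpw hsub hup hlow
    rcases List.pairwise_cons.mp hpw with ⟨hvle, hpw'⟩
    by_cases h1 : v < c
    · have h := ih c hpw' (fun y hy => hsub y (List.mem_cons_of_mem _ hy))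
        (fun y hy hcy => by
          have := hup y hy hcy
          rcases List.mem_cons.mp this with h | h
          · omega
          · exact h) hlow
      simpa [faScan, h1] using h
    · by_cases h2 : v = c
      · subst h2
        have h := ih (v + 1) hpw'
          (fun y hy => hsub y (List.mem_cons_of_mem _ hy))
          (fun y hy hcy => by
            have := hup y hy (by omega)
            rcases List.mem_cons.mp this with h | h
            · omega
            · exact h)
          (fun k hk hkc => by
            by_cases hkv : k = v
            · exact hkv ▸ hsub v (List.mem_cons_self)
            · exact hlow k hk (by omega))
        have hstep : faScan (v :: rest) v = faScan rest (v + 1) := by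
          simp [faScan]
        rw [hstep]
        exact ⟨by have := h.1; omega, h.2⟩
      · -- v > c: return c; c is not in l
        have hvgt : c < v := by omega
        simp only [faScan, if_neg h1, if_neg h2]
        refine ⟨le_refl _, fun hc => ?_, hlow⟩
        have hmem := hup c hc (le_refl c)
        rcases List.mem_cons.mp hmem with h | h
        · omega
        · have := hvle c h
          omega

-- faLoop reaches exactly the least free value r, provided r is within fuel reach.
theorem faLoop_reaches (l : List Int) (r : Int)
    (hr_not : r ∉ l) (hr_fill : ∀ k : Int, 0 ≤ k → k < r → k ∈ l) :
    ∀ (fuel : Nat) (c : Int), 0 ≤ c → c ≤ r → r - c ≤ (fuel : Int) →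
      faLoop (PySem.Set.ofList l) c fuel = r := by
  intro fuel
  induction fuel with
  | zero =>
    intro c _ hcr hfc
    have : c = r := by simpa using le_antisymm hcr (by omega)
    simpa [faLoop] using this
  | succ n ih =>
    intro c hc0 hcr hfc
    by_cases hmem : c ∈ l
    · have hne : c ≠ r := fun h => hr_not (h ▸ hmem)
      have hcont : PySem.Set.contains (PySem.Set.ofList l) c = true := by
        rw [PySem.Set.contains_iff, PySem.Set.mem_ofList]; exact hmem
      rw [faLoop, hcont, if_pos rfl]
      exact ih (c + 1) (by omega) (by omega) (by push_cast at hfc ⊢; omega)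
    · have hcr' : c = r := by
        by_contra h
        exact hmem (hr_fill c hc0 (by omega))
      have hcont : PySem.Set.contains (PySem.Set.ofList l) c = false := by
        rw [Bool.eq_false_iff]
        intro h
        exact hmem ((PySem.Set.mem_ofList _ _).mp ((PySem.Set.contains_iff _ _).mp h))
      rw [faLoop, hcont]
      simpa using hcr'

-- any least free value is at most the list length (counting distinct fillers)
theorem mex_le_length (l : List Int) (r : Int) (hr0 : 0 ≤ r)
    (hr_fill : ∀ k : Int, 0 ≤ k → k < r → k ∈ l) : r ≤ (l.length : Int) := by
  have hsub : Finset.Ico (0 : Int) r ⊆ l.toFinset := by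
    intro k hk
    rw [Finset.mem_Ico] at hk
    exact List.mem_toFinset.mpr (hr_fill k hk.1 hk.2)
  have hcard := Finset.card_le_card hsub
  have h1 : (Finset.Ico (0 : Int) r).card = r.toNat := by
    simp [Int.card_Ico]
  have h2 : l.toFinset.card ≤ l.length := l.toFinset_card_le
  omega

-- ===== VERDICT (by name: the statement is the Claim_ definition above) =====
theorem first_available_color_spec : Claim_equal_first_available_color := by
  intro l _
  unfold Spec_first_available_color first_available_color first_available_color_alt
  set s := PySem.List.sorted l (fun x => x) false with hs
  have hperm : s.Perm l := PySem.List.sorted_perm ..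
  have hpw : s.Pairwise (· ≤ ·) := by
    simpa using PySem.List.sorted_pairwise (xs := l) (key := fun x => x)
  have hscan := faScan_spec l s 0 hpw
    (fun y hy => hperm.mem_iff.mp hy)
    (fun y hy _ => hperm.mem_iff.mpr hy)
    (fun k hk hk0 => by omega)
  obtain ⟨hge, hnot, hfill⟩ := hscan
  have hlen : faScan s 0 ≤ (l.length : Int) := mex_le_length l _ hge hfill
  exact faLoop_reaches l (faScan s 0) hnot hfill (l.length + 1) 0 le_rfl hge
    (by push_cast; omega)
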